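-- pv_equiv track=rewrite | github.com/dhlyuxt/create-structure-md | scripts/v2_phase2.py | _duplicate_values
-- ===== SOURCE A (Python) =====
-- def _duplicate_values(values):
--     seen = set()
--     duplicates = set()
--     for value in values:
--         if value in seen:
--             duplicates.add(value)
--         seen.add(value)
--     return duplicates
-- ===== SOURCE B (Python) =====
-- def _duplicate_values(values):
--     first = {}
--     for i, v in enumerate(values):
--         first.setdefault(v, i)
--     return {v for i, v in enumerate(values) if first[v] != i}
-- ===== Notes on version B (the rewrite author's own statement) =====
-- stated objective: alternative
-- what changed: Replaces the inline two-set duplicate detection with a two-phase algorithm: a first pass builds a dict mapping each value to the index of its first occurrence, and a second pass collects every value that also occurs at a non-first index.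
import Mathlib
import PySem

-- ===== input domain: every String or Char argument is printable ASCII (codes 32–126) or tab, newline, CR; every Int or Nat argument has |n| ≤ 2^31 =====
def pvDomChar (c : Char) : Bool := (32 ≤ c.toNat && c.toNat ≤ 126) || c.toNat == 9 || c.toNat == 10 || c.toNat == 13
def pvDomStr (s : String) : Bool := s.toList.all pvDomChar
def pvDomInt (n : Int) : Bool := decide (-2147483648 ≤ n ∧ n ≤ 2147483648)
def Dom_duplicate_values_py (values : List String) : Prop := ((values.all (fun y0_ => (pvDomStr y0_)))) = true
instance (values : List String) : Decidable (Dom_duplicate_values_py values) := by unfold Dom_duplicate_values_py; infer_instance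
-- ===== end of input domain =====

-- B replaces A's inline two-set detection with two staged passes: a dict of first-occurrence indices, then a filter of non-first occurrences; alternative structure, same cost.


-- ===== PORT A =====
-- for value in values: if value in seen: duplicates.add(value); seen.add(value); return duplicates
def duplicate_values_py (values : List String) : List String :=
  (values.foldl
    (fun (st : PySem.Set String × PySem.Set String) value =>
      (PySem.Set.add st.1 value,
       if PySem.Set.contains st.1 value then PySem.Set.add st.2 value else st.2))
    (PySem.Set.empty, PySem.Set.empty)).2

-- ===== PORT B =====
-- pass 1: first = {}; for i, v in enumerate(values): first.setdefault(v, i)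
def pvFirstMap (values : List String) : PySem.Dict String Int :=
  (PySem.List.enumerate values 0).foldl
    (fun (d : PySem.Dict String Int) p => d.setdefault p.2 p.1) PySem.Dict.empty
-- pass 2: {v for i, v in enumerate(values) if first[v] != i}
-- (first[v] is ported as Dict.get?: every v of the list is a key of `first`, so the lookup never raises)
def duplicate_values_py_alt (values : List String) : List String :=
  PySem.Set.ofList
    (((PySem.List.enumerate values 0).filter
        (fun p => (pvFirstMap values).get? p.2 != some p.1)).map (·.2))

-- ===== PRECONDITION & SPEC =====
def Spec_duplicate_values_py (values : List String) (out : List String) : Prop := out = duplicate_values_py_alt values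
instance (values : List String) (out : List String) : Decidable (Spec_duplicate_values_py values out) := by unfold Spec_duplicate_values_py; infer_instance

-- ===== CLAIM =====
def Claim_equal_duplicate_values_py : Prop := ∀ (values : List String), Dom_duplicate_values_py values → Spec_duplicate_values_py values (duplicate_values_py values)

-- ===== LEMMAS AND PROOFS =====

-- common spine: walk the list keeping the processed prefix; add v to dup when v occurred before
def pvSpine : List String → List String → List String → List String
  | _, dup, [] => dup
  | pref, dup, v :: rest =>
      pvSpine (pref ++ [v]) (if v ∈ pref then PySem.Set.add dup v else dup) rest

lemma foldA_eq_spine : ∀ (l pref dup : List String),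
    (l.foldl
      (fun (st : PySem.Set String × PySem.Set String) value =>
        (PySem.Set.add st.1 value,
         if PySem.Set.contains st.1 value then PySem.Set.add st.2 value else st.2))
      (PySem.Set.ofList pref, dup)).2 = pvSpine pref dup l := by
  intro l
  induction l with
  | nil => intro pref dup; rfl
  | cons v rest ih =>
      intro pref dup
      have hc : PySem.Set.contains (PySem.Set.ofList pref) v = decide (v ∈ pref) := by
        simp [PySem.Set.contains_eq_listContains, PySem.Set.mem_ofList]
      have hadd : PySem.Set.add (PySem.Set.ofList pref) v = PySem.Set.ofList (pref ++ [v]) :=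
        (PySem.Set.ofList_append_singleton pref v).symm
      simp only [List.foldl_cons, hc, hadd]
      by_cases h : v ∈ pref
      · simp only [h, decide_true, if_true, pvSpine]
        exact ih (pref ++ [v]) _
      · simp only [h, decide_false, Bool.false_eq_true, if_false, pvSpine]
        exact ih (pref ++ [v]) _

-- the setdefault fold computes first-occurrence indices
lemma get?_firstfold : ∀ (l : List String) (s : Int) (d : PySem.Dict String Int) (v : String),
    (((PySem.List.enumerate l s).foldl
        (fun (d : PySem.Dict String Int) p => d.setdefault p.2 p.1) d).get? v)
      = if d.contains v then d.get? v
        else if v ∈ l then some (s + (List.idxOf v l : Int)) else none := by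
  intro l
  induction l with
  | nil =>
      intro s d v
      simp [PySem.List.enumerate_nil]
      intro h
      exact (PySem.Dict.get?_eq_none_iff_contains d v).mpr h
  | cons x xs ih =>
      intro s d v
      rw [PySem.List.enumerate_cons, List.foldl_cons]
      rw [ih (s + 1) (d.setdefault x s) v]
      by_cases hdv : d.contains v = true
      · have hdv' : (d.setdefault x s).contains v = true := by
          rw [PySem.Dict.contains_setdefault]; simp [hdv]
        rw [if_pos hdv', if_pos hdv]
        by_cases hvx : v = x
        · subst hvx
          rw [PySem.Dict.setdefault_of_contains d s hdv]
        · exact PySem.Dict.get?_setdefault_of_ne d s hvx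
      · by_cases hvx : v = x
        · subst hvx
          have hins : d.setdefault v s = d.insert v s :=
            PySem.Dict.setdefault_of_not_contains d s (by simpa using hdv)
          have hc : (d.setdefault v s).contains v = true := by
            rw [hins]; exact PySem.Dict.contains_insert_self d v s
          rw [if_pos hc, hins, PySem.Dict.get?_insert_self, if_neg hdv,
              if_pos (List.mem_cons_self), List.idxOf_cons_self]
          simp
        · have hc : (d.setdefault x s).contains v = d.contains v := by
            rw [PySem.Dict.contains_setdefault]
            simp [hvx]
          rw [hc, if_neg hdv, if_neg hdv]
          by_cases hm : v ∈ xs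
          · rw [if_pos hm, if_pos (List.mem_cons_of_mem x hm),
                List.idxOf_cons_ne xs (fun he => hvx he.symm)]
            congr 1
            push_cast
            ring
          · rw [if_neg hm, if_neg (by simp [hvx, hm])]

-- the head-of-suffix test: first[v] ≠ len(pref) iff v already occurred in pref
lemma firstmap_head_test (pref rest : List String) (v : String) :
    ((pvFirstMap (pref ++ v :: rest)).get? v != some (pref.length : Int))
      = decide (v ∈ pref) := by
  have hmem : v ∈ pref ++ v :: rest := by simp
  have h := get?_firstfold (pref ++ v :: rest) 0 PySem.Dict.empty v
  rw [PySem.Dict.contains_empty, if_neg (by simp), if_pos hmem] at h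
  unfold pvFirstMap
  rw [h]
  by_cases hv : v ∈ pref
  · have hlt : List.idxOf v (pref ++ v :: rest) < pref.length := by
      rw [List.idxOf_append_of_mem hv]
      exact List.idxOf_lt_length_of_mem hv
    simp only [hv, decide_true]
    simp only [bne_iff_ne, ne_eq, Option.some.injEq]
    simp only [zero_add]
    intro hEq
    omega
  · have heq : List.idxOf v (pref ++ v :: rest) = pref.length := by
      rw [List.idxOf_append_of_notMem hv, List.idxOf_cons_self]
      omega
    simp [hv, heq]

lemma enumB_eq_spine : ∀ (l pref dup : List String),
    PySem.Set.update dup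
      (((PySem.List.enumerate l (pref.length : Int)).filter
          (fun p => (pvFirstMap (pref ++ l)).get? p.2 != some p.1)).map (·.2))
      = pvSpine pref dup l := by
  intro l
  induction l with
  | nil => intro pref dup; simp [PySem.List.enumerate_nil, pvSpine, PySem.Set.update_nil]
  | cons v rest ih =>
      intro pref dup
      have hcl : (pref ++ v :: rest) = (pref ++ [v]) ++ rest := by simp
      have hlen : ((pref.length : Int) + 1) = (((pref ++ [v]).length : Int)) := by simp
      rw [PySem.List.enumerate_cons, List.filter_cons]
      simp only [firstmap_head_test pref rest v]
      by_cases h : v ∈ pref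
      · simp only [h, decide_true, if_true, List.map_cons, PySem.Set.update_cons,
          pvSpine]
        rw [hlen, hcl]
        exact ih (pref ++ [v]) _
      · simp only [h, decide_false, Bool.false_eq_true, if_false, pvSpine]
        rw [hlen, hcl]
        exact ih (pref ++ [v]) _

-- ===== VERDICT =====
theorem duplicate_values_py_spec : Claim_equal_duplicate_values_py := by
  intro values _
  show duplicate_values_py values = duplicate_values_py_alt values
  have hA : duplicate_values_py values = pvSpine [] [] values := by
    have := foldA_eq_spine values [] []
    simpa [duplicate_values_py, PySem.Set.empty, PySem.Set.ofList_nil] using this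
  have hB : duplicate_values_py_alt values = pvSpine [] [] values := by
    have := enumB_eq_spine values [] []
    simpa [duplicate_values_py_alt, PySem.Set.ofList, PySem.Set.update] using this
  rw [hA, hB]
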